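-- pv_equiv track=rewrite | github.com/JinSan-RM/Mini_Project | Yolo & EfficientNet/main.py | text_on_left_image
-- ===== SOURCE A (Python) =====
-- def text_on_left_image(image_boxes, text_boxes):                                # 텍스트가 image 왼쪽에 있는지 체크
--
--     for text_box in text_boxes:
--         _, text_x_max, _, _ = text_box
--         for image_box in image_boxes:
--             image_x_min, _, _, _ = image_box
--             if text_x_max <= image_x_min:
--                 return True
--
--     return False
-- ===== SOURCE B (Python) =====
-- def text_on_left_image(image_boxes, text_boxes):
--     if not image_boxes or not text_boxes:
--         return False
--     return min(t[1] for t in text_boxes) <= max(i[0] for i in image_boxes)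
-- ===== Notes on version B (the rewrite author's own statement) =====
-- stated objective: faster
-- what changed: Replaces the nested scan over all text/image pairs with one pass computing min text x_max and one pass computing max image x_min, then a single comparison.
import Mathlib
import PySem

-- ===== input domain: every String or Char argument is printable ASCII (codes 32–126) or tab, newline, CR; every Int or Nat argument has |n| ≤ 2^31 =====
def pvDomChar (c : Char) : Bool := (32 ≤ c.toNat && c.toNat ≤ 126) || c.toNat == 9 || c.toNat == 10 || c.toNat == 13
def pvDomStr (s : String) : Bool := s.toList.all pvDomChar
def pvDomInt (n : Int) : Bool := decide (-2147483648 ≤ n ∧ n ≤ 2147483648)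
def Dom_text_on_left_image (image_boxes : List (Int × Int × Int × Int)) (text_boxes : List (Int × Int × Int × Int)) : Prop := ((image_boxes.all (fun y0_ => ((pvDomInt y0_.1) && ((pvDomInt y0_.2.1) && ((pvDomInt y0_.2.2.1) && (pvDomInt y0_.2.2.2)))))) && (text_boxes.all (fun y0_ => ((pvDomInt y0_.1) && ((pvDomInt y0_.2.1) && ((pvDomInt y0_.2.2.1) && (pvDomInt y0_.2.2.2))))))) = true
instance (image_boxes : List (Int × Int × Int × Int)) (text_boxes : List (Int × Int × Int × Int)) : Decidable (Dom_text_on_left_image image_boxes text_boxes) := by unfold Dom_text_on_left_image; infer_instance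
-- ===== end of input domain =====

-- B replaces A's nested pairwise scan by comparing min text x_max with max image x_min (objective: faster).


-- ===== PORT A =====
-- Port of A: for each text_box, for each image_box, return True on the first pair with
-- text_x_max <= image_x_min; else False. The early-return nested loop is List.any.
def text_on_left_image (image_boxes : List (Int × Int × Int × Int)) (text_boxes : List (Int × Int × Int × Int)) : Bool :=
  text_boxes.any (fun text_box =>
    image_boxes.any (fun image_box => decide (text_box.2.1 ≤ image_box.1)))

-- ===== PORT B =====
-- Port of B: single pass for min text x_max, single pass for max image x_min, one comparison.
def text_on_left_image_alt (image_boxes : List (Int × Int × Int × Int)) (text_boxes : List (Int × Int × Int × Int)) : Bool :=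
  if image_boxes.isEmpty || text_boxes.isEmpty then false
  else
    match (text_boxes.map (fun t => t.2.1)).min?, (image_boxes.map (fun i => i.1)).max? with
    | some m, some M => decide (m ≤ M)
    | _, _ => false

-- ===== PRECONDITION & SPEC =====
def Spec_text_on_left_image (image_boxes : List (Int × Int × Int × Int)) (text_boxes : List (Int × Int × Int × Int)) (out : Bool) : Prop := out = text_on_left_image_alt image_boxes text_boxes
instance (image_boxes : List (Int × Int × Int × Int)) (text_boxes : List (Int × Int × Int × Int)) (out : Bool) : Decidable (Spec_text_on_left_image image_boxes text_boxes out) := by unfold Spec_text_on_left_image; infer_instance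

-- ===== CLAIM (what is proved, stated in full; the proofs are below) =====
def Claim_equal_text_on_left_image : Prop := ∀ (image_boxes : List (Int × Int × Int × Int)) (text_boxes : List (Int × Int × Int × Int)), Dom_text_on_left_image image_boxes text_boxes → Spec_text_on_left_image image_boxes text_boxes (text_on_left_image image_boxes text_boxes)

-- ===== LEMMAS AND PROOFS =====

-- ===== VERDICT (by name: the statement is the Claim_ definition above) =====
theorem text_on_left_image_spec : Claim_equal_text_on_left_image := by
  intro ib tb _
  unfold Spec_text_on_left_image text_on_left_image text_on_left_image_alt
  cases ib with
  | nil => simp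
  | cons i0 ib' =>
  cases tb with
  | nil => simp
  | cons t0 tb' =>
    simp only [List.isEmpty_cons, Bool.or_self, if_neg, Bool.false_eq_true,
      not_false_eq_true]
    obtain ⟨m, hm⟩ : ∃ m, (((t0 :: tb').map (fun t => t.2.1)).min? = some m) := by
      simp [List.min?_cons]
    obtain ⟨M, hM⟩ : ∃ M, (((i0 :: ib').map (fun i => i.1)).max? = some M) := by
      simp [List.max?_cons]
    rw [hm, hM]
    rw [List.min?_eq_some_iff] at hm
    rw [List.max?_eq_some_iff] at hM
    obtain ⟨hmem, hml⟩ := hm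
    obtain ⟨hMem, hMl⟩ := hM
    apply Bool.eq_iff_iff.mpr
    simp only [List.any_eq_true, decide_eq_true_eq]
    constructor
    · rintro ⟨t, ht, i, hi, hle⟩
      calc m ≤ t.2.1 := hml _ (List.mem_map_of_mem ht)
        _ ≤ i.1 := hle
        _ ≤ M := hMl _ (List.mem_map_of_mem hi)
    · intro h
      obtain ⟨t, ht, htm⟩ := List.mem_map.mp hmem
      obtain ⟨i, hi, hiM⟩ := List.mem_map.mp hMem
      exact ⟨t, ht, i, hi, by omega⟩
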